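-- pv_equiv track=rewrite | github.com/sv3nbeast/FindHouse | Rank.py | xingjiabi_rank
-- ===== SOURCE A (Python) =====
-- def xingjiabi_rank(arr):
--     i = 0
--     x = 0   #解决相同价格影响排序的参数
--     contr = []
--     for i in range(len(arr)):
--         contrast_time_A = arr[i]['xingjiabi']
--         try:
--             contrast_time_B = arr[i+1]['xingjiabi']
--         except:
--             contrast_time_B = arr[i]['xingjiabi']
--             time_index = i + 1 - x
--             arr[i]['xingjiabi_rank'] = time_index
--             contr.append(arr[i])
--             break
--         if contrast_time_A != contrast_time_B:
--             time_index = i + 1 - x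
--             arr[i]['xingjiabi_rank'] = time_index
--             contr.append(arr[i])
--         else:
--             time_index = i + 1 - x
--             x += 1
--             arr[i]['xingjiabi_rank'] = time_index
--             contr.append(arr[i])
--     return contr
-- ===== SOURCE B (Python) =====
-- def xingjiabi_rank(arr):
--     # rank = ordinal of the run of equal adjacent values; outer loop per run,
--     # inner loop consumes the whole run
--     contr = []
--     rank = 0
--     i = 0
--     while i < len(arr):
--         rank += 1
--         v = arr[i]['xingjiabi']
--         while i < len(arr) and arr[i]['xingjiabi'] == v:
--             arr[i]['xingjiabi_rank'] = rank
--             contr.append(arr[i])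
--             i += 1
--     return contr
-- ===== Notes on version B (the rewrite author's own statement) =====
-- stated objective: simpler
-- what changed: Recasts the rank as the ordinal of the run of equal adjacent values: an outer loop per run and an inner loop that consumes the whole run, replacing A's per-element lookahead at arr[i+1] guarded by a bare try/except and the subtractive duplicate counter x.
-- outside the precondition, e.g. on xingjiabi_rank([{'xingjiabi': 5}, {}]): A returns [{'xingjiabi': 5, 'xingjiabi_rank': 1}], B raises KeyError
import Mathlib
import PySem

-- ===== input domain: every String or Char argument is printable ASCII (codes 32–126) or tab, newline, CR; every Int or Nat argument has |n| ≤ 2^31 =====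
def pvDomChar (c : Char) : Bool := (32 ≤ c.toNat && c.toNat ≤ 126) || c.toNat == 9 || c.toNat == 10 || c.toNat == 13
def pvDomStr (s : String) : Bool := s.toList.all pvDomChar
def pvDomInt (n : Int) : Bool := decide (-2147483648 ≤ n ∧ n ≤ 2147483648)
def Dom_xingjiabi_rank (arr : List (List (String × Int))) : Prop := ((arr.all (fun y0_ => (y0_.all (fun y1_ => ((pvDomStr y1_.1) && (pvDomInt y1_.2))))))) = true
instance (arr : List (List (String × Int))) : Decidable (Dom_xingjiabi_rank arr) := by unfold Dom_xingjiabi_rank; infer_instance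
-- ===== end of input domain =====

-- B recasts the ranking as "the rank is the ordinal of the run of equal adjacent values": an outer
-- loop per run and an inner loop that consumes the whole run, replacing A's per-element lookahead
-- with try/except and subtractive counter x (objective: simpler).
-- Both A and B mutate the input dicts in place (adding 'xingjiabi_rank'); the equivalence proved
-- here is about the returned list of dicts.

-- ===== PORT A =====
-- A's loop reads arr[i] and arr[i+1]; ported as recursion on the suffix carrying the index i and
-- the counter x.  Under Pre_ every element has the key 'xingjiabi', so the dict lookup is getD
-- (outside Pre_ the Python raises KeyError and nothing is claimed).  The except-branch (arr[i+1]
-- out of range) is the singleton case: rank this last element, append it and break.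
def xingjiabiLoopA : List (List (String × Int)) → Nat → Int → List (List (String × Int))
  | [], _, _ => []
  | [a], i, x =>
    -- except IndexError on arr[i+1]: rank this last element, append it and break
    [((PySem.Dict.mk a).insert "xingjiabi_rank" ((i : Int) + 1 - x)).items]
  | a :: b :: rest, i, x =>
    match (PySem.Dict.mk b).get? "xingjiabi" with
    | none =>
      -- the bare except also catches the KeyError from arr[i+1]['xingjiabi']: same break branch
      [((PySem.Dict.mk a).insert "xingjiabi_rank" ((i : Int) + 1 - x)).items]
    | some contrast_time_B =>
      if (PySem.Dict.mk a).getD "xingjiabi" 0 ≠ contrast_time_B then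
        ((PySem.Dict.mk a).insert "xingjiabi_rank" ((i : Int) + 1 - x)).items ::
          xingjiabiLoopA (b :: rest) (i + 1) x
      else
        ((PySem.Dict.mk a).insert "xingjiabi_rank" ((i : Int) + 1 - x)).items ::
          xingjiabiLoopA (b :: rest) (i + 1) (x + 1)

def xingjiabi_rank (arr : List (List (String × Int))) : List (List (String × Int)) :=
  xingjiabiLoopA arr 0 0

-- ===== PORT B =====
-- Source B's outer while runs once per run of equal adjacent values (rank += 1), the inner while
-- consumes the run; ported as recursion on the suffix, the inner loop as takeWhile/dropWhile of
-- the leading run (the elements whose 'xingjiabi' equals the run head's value v).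
def xingjiabiLoopB : List (List (String × Int)) → Int → List (List (String × Int))
  | [], _ => []
  | a :: rest, rank =>
    let v := (PySem.Dict.mk a).getD "xingjiabi" 0
    ((a :: rest.takeWhile (fun d => (PySem.Dict.mk d).getD "xingjiabi" 0 == v)).map
        (fun d => ((PySem.Dict.mk d).insert "xingjiabi_rank" (rank + 1)).items))
      ++ xingjiabiLoopB
          (rest.dropWhile (fun d => (PySem.Dict.mk d).getD "xingjiabi" 0 == v)) (rank + 1)
termination_by l _ => l.length
decreasing_by
  exact Nat.lt_succ_of_le (List.length_dropWhile_le _ _)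

def xingjiabi_rank_alt (arr : List (List (String × Int))) : List (List (String × Int)) :=
  xingjiabiLoopB arr 0

-- ===== PRECONDITION & SPEC =====
-- Pre_ excludes elements lacking the key 'xingjiabi' (A raises KeyError on the first element, and
-- its bare except accidentally truncates the result when a later element lacks it, where B raises)
-- and elements with duplicate keys (not representable in a Python dict, so lookup order is moot).
def Pre_xingjiabi_rank (arr : List (List (String × Int))) : Prop :=
  ∀ d ∈ arr, (d.map Prod.fst).Nodup ∧ "xingjiabi" ∈ d.map Prod.fst
instance (arr : List (List (String × Int))) : Decidable (Pre_xingjiabi_rank arr) := by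
  unfold Pre_xingjiabi_rank; infer_instance

def pvWitness_xingjiabi_rank : (List (List (String × Int))) :=
  [[("xingjiabi", 3)], [("xingjiabi", 3), ("price", 9)], [("xingjiabi", 1)]]

def Spec_xingjiabi_rank (arr : List (List (String × Int))) (out : List (List (String × Int))) : Prop := out = xingjiabi_rank_alt arr
instance (arr : List (List (String × Int))) (out : List (List (String × Int))) : Decidable (Spec_xingjiabi_rank arr out) := by unfold Spec_xingjiabi_rank; infer_instance

-- ===== CLAIM (what is proved, stated in full; the proofs are below) =====
def Claim_equal_xingjiabi_rank : Prop := ∀ (arr : List (List (String × Int))), Dom_xingjiabi_rank arr → Pre_xingjiabi_rank arr → Spec_xingjiabi_rank arr (xingjiabi_rank arr)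

-- ===== LEMMAS AND PROOFS =====

-- a dict whose key list contains "xingjiabi" answers get? with some of its getD value
theorem dict_get_some (d : List (String × Int)) (h : "xingjiabi" ∈ d.map Prod.fst) :
    (PySem.Dict.mk d).get? "xingjiabi" = some ((PySem.Dict.mk d).getD "xingjiabi" 0) := by
  induction d with
  | nil => simp at h
  | cons kv t ih =>
    obtain ⟨k, v⟩ := kv
    by_cases hk : k = "xingjiabi"
    · simp [PySem.Dict.getD_eq_get?_getD, PySem.Dict.get?_mk_cons, hk]
    · have hmem : "xingjiabi" ∈ t.map Prod.fst := by
        simp only [List.map_cons, List.mem_cons] at h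
        exact h.resolve_left (fun he => hk he.symm)
      have e1 : (PySem.Dict.mk ((k, v) :: t)).get? "xingjiabi" = (PySem.Dict.mk t).get? "xingjiabi" := by
        simp [PySem.Dict.get?_mk_cons, hk]
      have e2 : (PySem.Dict.mk ((k, v) :: t)).getD "xingjiabi" 0 = (PySem.Dict.mk t).getD "xingjiabi" 0 := by
        simp [PySem.Dict.getD_eq_get?_getD, e1]
      rw [e1, e2, ih hmem]

-- if the second element has the same value as the run head, B's run absorbs it: peeling the head
-- off a run keeps the same rank for the rest of the run
theorem loopB_absorb (a b : List (String × Int)) (rest : List (List (String × Int))) (r : Int)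
    (h : (PySem.Dict.mk b).getD "xingjiabi" 0 = (PySem.Dict.mk a).getD "xingjiabi" 0) :
    xingjiabiLoopB (a :: b :: rest) r =
      ((PySem.Dict.mk a).insert "xingjiabi_rank" (r + 1)).items :: xingjiabiLoopB (b :: rest) r := by
  rw [xingjiabiLoopB, xingjiabiLoopB]
  simp [h]

theorem loopB_nil (r : Int) : xingjiabiLoopB [] r = [] := by rw [xingjiabiLoopB]

-- Loop invariant: entering the loops with the same suffix l (all of whose dicts carry the key
-- "xingjiabi"), A's next assigned rank (i+1-x) equals the rank B assigns to l's leading run (r+1).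
theorem xingjiabiLoop_eq (l : List (List (String × Int))) :
    ∀ (i : Nat) (x r : Int),
      (∀ d ∈ l, "xingjiabi" ∈ d.map Prod.fst) →
      (i : Int) + 1 - x = r + 1 →
      xingjiabiLoopA l i x = xingjiabiLoopB l r := by
  induction l with
  | nil => intro i x r _ _; rw [loopB_nil]; rfl
  | cons a rest ih =>
    intro i x r hk hr
    cases rest with
    | nil =>
      rw [xingjiabiLoopA, xingjiabiLoopB]
      simp [hr, loopB_nil]
    | cons b rest' =>
      have hkb : "xingjiabi" ∈ b.map Prod.fst := hk b (by simp)
      rw [xingjiabiLoopA]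
      simp only [dict_get_some b hkb]
      by_cases hv : (PySem.Dict.mk a).getD "xingjiabi" 0 ≠ (PySem.Dict.mk b).getD "xingjiabi" 0
      · rw [if_pos hv]
        have hfalse : ((PySem.Dict.mk b).getD "xingjiabi" 0 == (PySem.Dict.mk a).getD "xingjiabi" 0) = false := by
          simp; exact fun hc => hv hc.symm
        rw [xingjiabiLoopB]
        simp only [List.takeWhile_cons, List.dropWhile_cons, hfalse]
        simp only [if_neg Bool.false_ne_true, List.map_cons, List.map_nil, List.cons_append,
          List.nil_append, hr]
        congr 1
        exact ih (i + 1) x (r + 1) (fun d hd => hk d (List.mem_cons_of_mem a hd)) (by push_cast; omega)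
      · rw [if_neg hv]
        have heq : (PySem.Dict.mk b).getD "xingjiabi" 0 = (PySem.Dict.mk a).getD "xingjiabi" 0 := by
          by_contra hc; exact hv (fun he => hc he.symm)
        rw [loopB_absorb a b rest' r heq, hr]
        congr 1
        exact ih (i + 1) (x + 1) r (fun d hd => hk d (List.mem_cons_of_mem a hd)) (by push_cast; omega)

-- ===== VERDICT (by name: the statement is the Claim_ definition above) =====
theorem xingjiabi_rank_spec : Claim_equal_xingjiabi_rank := by
  intro arr _ hpre
  unfold Spec_xingjiabi_rank xingjiabi_rank xingjiabi_rank_alt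
  exact xingjiabiLoop_eq arr 0 0 0 (fun d hd => (hpre d hd).2) (by norm_num)
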